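-- pv_equiv track=rewrite | github.com/sfinktah/sfida | structmaker.py | getPackType
-- ===== SOURCE A (Python) =====
-- def log2(v):
--     return v.bit_length() - 1
--
-- def getPackType(size, unsigned = True, count = 1, is_float = False):
--     if size is None and unsigned is None:
--         rv = '!'
--     elif size is None:
--         rv = '.'
--     elif isinstance(size, int):
--         if unsigned is None:
--             #  rv = ':' * log2(size * 2)
--             unsigned = True
--         packType = 'bBhHiIqQ'
--         packTypeFloat = '????ffdd'
--         if is_float:
--             packType = packTypeFloat
--         extra = ''
--         while size > 8:
--             if not size % 8:
--                 extra += packType[7]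
--                 size -= 8
--             elif not size % 4:
--                 extra += packType[5]
--                 size -= 4
--             elif not size % 2:
--                 extra += packType[3]
--                 size -= 2
--             else:
--                 extra += packType[1]
--                 size -= 1
--
--         name = 2 * log2(size) + int(unsigned)
--         if name < len(packType):
--             rv = extra + packType[name]
--         else:
--             raise Exception("Invalid padType: %s (%s)" % (name, size))
--         if count > 1:
--             if rv == 'b':
--                 return "%is" % count
--             return "%i%s" % (count, rv)
--     return rv
-- ===== SOURCE B (Python) =====
-- def getPackType(size, unsigned=True, count=1, is_float=False):
--     if size is None:
--         return '!' if unsigned is None else '.'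
--     u = 0 if unsigned is False else 1   # unsigned=None defaults to unsigned
--     pt = '????ffdd' if is_float else 'bBhHiIqQ'
--     if size > 8:
--         # closed form of the chunking: one small chunk per low bit of size % 8,
--         # then (size // 8 - 1) eight-byte chunks, then the final 8-bit-sized code
--         q, r = divmod(size, 8)
--         rv = ((pt[1] if r % 2 else '') + (pt[3] if r % 4 >= 2 else '')
--               + (pt[5] if r >= 4 else '') + pt[7] * (q - 1) + pt[6 + u])
--     else:
--         # size == 0 indexes pt[-2 + u], the same 'q'/'Q'/'d' as size == 8
--         rv = pt[2 * (abs(size).bit_length() - 1) + u]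
--     if count > 1:
--         return '%is' % count if rv == 'b' else '%i%s' % (count, rv)
--     return rv
-- ===== Notes on version B (the rewrite author's own statement) =====
-- stated objective: faster
-- what changed: A's while-loop that subtracts 8/4/2/1 per iteration while appending one character at a time is replaced by a closed form: divmod(size, 8) gives the remainder bits that determine at most three small-chunk characters plus 'Q'*(q-1) built by string multiplication.
import Mathlib
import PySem

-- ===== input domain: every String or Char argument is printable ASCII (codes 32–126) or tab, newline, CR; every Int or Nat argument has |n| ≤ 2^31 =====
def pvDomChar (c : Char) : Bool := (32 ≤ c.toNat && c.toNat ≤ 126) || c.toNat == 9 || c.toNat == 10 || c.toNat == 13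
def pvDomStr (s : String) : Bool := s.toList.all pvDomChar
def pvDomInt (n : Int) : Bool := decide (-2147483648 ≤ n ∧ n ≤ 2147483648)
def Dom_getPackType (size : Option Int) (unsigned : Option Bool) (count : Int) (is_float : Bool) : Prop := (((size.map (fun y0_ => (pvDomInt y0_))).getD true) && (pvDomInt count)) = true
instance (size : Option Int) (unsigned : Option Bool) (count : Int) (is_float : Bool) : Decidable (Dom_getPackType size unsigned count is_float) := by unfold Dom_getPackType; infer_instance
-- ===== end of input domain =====

-- B replaces A's one-character-per-iteration subtraction loop by a closed form from divmod(size, 8)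
-- (equal return values proved on Pre_; neither version mutates its arguments).

-- ===== PORT A =====
-- the while-loop of A: returns (extra, final size)
def pvALoop (pt : List Char) (size : Int) (extra : List Char) : List Char × Int :=
  if h : 8 < size then
    if PySem.Int.mod size 8 = 0 then
      pvALoop pt (size - 8) (extra ++ [PySem.List.pyGetD pt 7 ' '])
    else if PySem.Int.mod size 4 = 0 then
      pvALoop pt (size - 4) (extra ++ [PySem.List.pyGetD pt 5 ' '])
    else if PySem.Int.mod size 2 = 0 then
      pvALoop pt (size - 2) (extra ++ [PySem.List.pyGetD pt 3 ' '])
    else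
      pvALoop pt (size - 1) (extra ++ [PySem.List.pyGetD pt 1 ' '])
  else (extra, size)
termination_by size.toNat
decreasing_by all_goals omega

def getPackType (size : Option Int) (unsigned : Option Bool) (count : Int) (is_float : Bool) : String :=
  match size, unsigned with
  | none, none => "!"
  | none, some _ => "."
  | some s, u0 =>
    -- 'if unsigned is None: unsigned = True'
    let unsigned := u0.getD true
    let packType : List Char := if is_float then "????ffdd".toList else "bBhHiIqQ".toList
    let p := pvALoop packType s []
    let extra := p.1
    let s := p.2
    -- name = 2 * log2(size) + int(unsigned), log2 v = v.bit_length() - 1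
    let name : Int := 2 * ((PySem.Int.bitLength s : Int) - 1) + (if unsigned then 1 else 0)
    if name < 8 then
      let rv := extra ++ [PySem.List.pyGetD packType name ' ']
      if 1 < count then
        if rv = ['b'] then String.ofList (PySem.Int.toChars count ++ ['s'])
        else String.ofList (PySem.Int.toChars count ++ rv)
      else String.ofList rv
    else ""   -- Python: raise Exception("Invalid padType ...") — excluded by Pre_getPackType

-- ===== PORT B =====
def getPackType_alt (size : Option Int) (unsigned : Option Bool) (count : Int) (is_float : Bool) : String :=
  match size with
  | none => if unsigned = none then "!" else "."
  | some s =>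
    let u : Int := if unsigned = some false then 0 else 1
    let pt : List Char := if is_float then "????ffdd".toList else "bBhHiIqQ".toList
    let rv : List Char :=
      if 8 < s then
        -- q, r = divmod(size, 8); small chunks from r's bits, then pt[7]*(q-1), then pt[6+u]
        let q := PySem.Int.floordiv s 8
        let r := PySem.Int.mod s 8
        (if PySem.Int.mod r 2 ≠ 0 then [PySem.List.pyGetD pt 1 ' '] else [])
          ++ (if 2 ≤ PySem.Int.mod r 4 then [PySem.List.pyGetD pt 3 ' '] else [])
          ++ (if 4 ≤ r then [PySem.List.pyGetD pt 5 ' '] else [])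
          ++ List.replicate (q - 1).toNat (PySem.List.pyGetD pt 7 ' ')
          ++ [PySem.List.pyGetD pt (6 + u) ' ']
      else
        [PySem.List.pyGetD pt (2 * ((PySem.Int.bitLength s : Int) - 1) + u) ' ']
    if 1 < count then
      if rv = ['b'] then String.ofList (PySem.Int.toChars count ++ ['s'])
      else String.ofList (PySem.Int.toChars count ++ rv)
    else String.ofList rv

-- ===== PRECONDITION & SPEC =====
-- A raises Exception("Invalid padType ...") exactly when size is an int ≤ -16; Pre_ excludes those inputs.
def Pre_getPackType (size : Option Int) (unsigned : Option Bool) (count : Int) (is_float : Bool) : Prop :=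
  -16 < size.getD 0
instance (size : Option Int) (unsigned : Option Bool) (count : Int) (is_float : Bool) : Decidable (Pre_getPackType size unsigned count is_float) := by unfold Pre_getPackType; infer_instance

def pvWitness_getPackType : Option Int × Option Bool × Int × Bool := (some 13, some false, 3, false)

def Spec_getPackType (size : Option Int) (unsigned : Option Bool) (count : Int) (is_float : Bool) (out : String) : Prop := out = getPackType_alt size unsigned count is_float
instance (size : Option Int) (unsigned : Option Bool) (count : Int) (is_float : Bool) (out : String) : Decidable (Spec_getPackType size unsigned count is_float out) := by unfold Spec_getPackType; infer_instance

-- ===== CLAIM (what is proved, stated in full; the proofs are below) =====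
def Claim_equal_getPackType : Prop := ∀ (size : Option Int) (unsigned : Option Bool) (count : Int) (is_float : Bool), Dom_getPackType size unsigned count is_float → Pre_getPackType size unsigned count is_float → Spec_getPackType size unsigned count is_float (getPackType size unsigned count is_float)

-- ===== LEMMAS AND PROOFS =====

-- B's chunk string for size > 8, as a standalone term (exactly B's rv minus the final character)
def pvChunks (pt : List Char) (s : Int) : List Char :=
  let q := PySem.Int.floordiv s 8
  let r := PySem.Int.mod s 8
  (if PySem.Int.mod r 2 ≠ 0 then [PySem.List.pyGetD pt 1 ' '] else [])
    ++ (if 2 ≤ PySem.Int.mod r 4 then [PySem.List.pyGetD pt 3 ' '] else [])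
    ++ (if 4 ≤ r then [PySem.List.pyGetD pt 5 ' '] else [])
    ++ List.replicate (q - 1).toNat (PySem.List.pyGetD pt 7 ' ')

lemma pvChunks_nf (pt : List Char) (s : Int) :
    pvChunks pt s =
      (if s % 2 = 1 then [PySem.List.pyGetD pt 1 ' '] else [])
        ++ (if 2 ≤ s % 4 then [PySem.List.pyGetD pt 3 ' '] else [])
        ++ (if 4 ≤ s % 8 then [PySem.List.pyGetD pt 5 ' '] else [])
        ++ List.replicate (s / 8 - 1).toNat (PySem.List.pyGetD pt 7 ' ') := by
  have h8 : PySem.Int.mod s 8 = s % 8 := PySem.Int.mod_eq_emod_of_pos (by norm_num)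
  have hq : PySem.Int.floordiv s 8 = s / 8 := PySem.Int.floordiv_eq_ediv_of_pos (by norm_num)
  have h2 : PySem.Int.mod (s % 8) 2 = s % 8 % 2 := PySem.Int.mod_eq_emod_of_pos (by norm_num)
  have h4 : PySem.Int.mod (s % 8) 4 = s % 8 % 4 := PySem.Int.mod_eq_emod_of_pos (by norm_num)
  have e1 : (s % 8 % 2 ≠ 0) = (s % 2 = 1) := by apply propext; omega
  have e2 : (2 ≤ s % 8 % 4) = (2 ≤ s % 4) := by apply propext; omega
  simp only [pvChunks, h8, hq, h2, h4, e1, e2]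

lemma pvChunks_eight (pt : List Char) : pvChunks pt 8 = [] := by
  rw [pvChunks_nf]; norm_num

lemma pvChunks_odd (pt : List Char) (s : Int) (h : s % 2 = 1) :
    pvChunks pt s = PySem.List.pyGetD pt 1 ' ' :: pvChunks pt (s - 1) := by
  rw [pvChunks_nf, pvChunks_nf]
  have e2 : (2 ≤ (s - 1) % 4) = (2 ≤ s % 4) := by apply propext; omega
  have e3 : (4 ≤ (s - 1) % 8) = (4 ≤ s % 8) := by apply propext; omega
  have e4 : (s - 1) / 8 = s / 8 := by omega
  rw [if_pos h, if_neg (show ¬((s - 1) % 2 = 1) by omega)]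
  simp only [e2, e3, e4]
  simp

lemma pvChunks_two (pt : List Char) (s : Int) (h : s % 4 = 2) :
    pvChunks pt s = PySem.List.pyGetD pt 3 ' ' :: pvChunks pt (s - 2) := by
  rw [pvChunks_nf, pvChunks_nf]
  have e3 : (4 ≤ (s - 2) % 8) = (4 ≤ s % 8) := by apply propext; omega
  have e4 : (s - 2) / 8 = s / 8 := by omega
  rw [if_neg (show ¬(s % 2 = 1) by omega), if_neg (show ¬((s - 2) % 2 = 1) by omega),
      if_pos (show 2 ≤ s % 4 by omega), if_neg (show ¬(2 ≤ (s - 2) % 4) by omega)]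
  simp only [e3, e4]
  simp

lemma pvChunks_four (pt : List Char) (s : Int) (h : s % 8 = 4) :
    pvChunks pt s = PySem.List.pyGetD pt 5 ' ' :: pvChunks pt (s - 4) := by
  rw [pvChunks_nf, pvChunks_nf]
  have e4 : (s - 4) / 8 = s / 8 := by omega
  rw [if_neg (show ¬(s % 2 = 1) by omega), if_neg (show ¬((s - 4) % 2 = 1) by omega),
      if_neg (show ¬(2 ≤ s % 4) by omega), if_neg (show ¬(2 ≤ (s - 4) % 4) by omega),
      if_pos (show 4 ≤ s % 8 by omega), if_neg (show ¬(4 ≤ (s - 4) % 8) by omega)]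
  simp only [e4]
  simp

lemma pvChunks_full (pt : List Char) (s : Int) (h : s % 8 = 0) (hs : 8 < s) :
    pvChunks pt s = PySem.List.pyGetD pt 7 ' ' :: pvChunks pt (s - 8) := by
  rw [pvChunks_nf, pvChunks_nf]
  rw [if_neg (show ¬(s % 2 = 1) by omega), if_neg (show ¬((s - 8) % 2 = 1) by omega),
      if_neg (show ¬(2 ≤ s % 4) by omega), if_neg (show ¬(2 ≤ (s - 8) % 4) by omega),
      if_neg (show ¬(4 ≤ s % 8) by omega), if_neg (show ¬(4 ≤ (s - 8) % 8) by omega)]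
  have : (s / 8 - 1).toNat = ((s - 8) / 8 - 1).toNat + 1 := by omega
  rw [this, List.replicate_succ]
  simp

-- the loop of A computes exactly B's closed-form chunk string and ends at size = 8
lemma pvALoop_eq_chunks (pt : List Char) :
    ∀ (n : Nat) (s : Int), s.toNat ≤ n → 8 ≤ s → ∀ extra,
      pvALoop pt s extra = (extra ++ pvChunks pt s, 8) := by
  intro n
  induction n with
  | zero => intro s hs h8 extra; omega
  | succ n ih =>
    intro s hs h8 extra
    rcases eq_or_lt_of_le h8 with heq | hlt
    · subst heq
      rw [pvALoop, dif_neg (by omega), pvChunks_eight]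
      simp
    · have hm8 : PySem.Int.mod s 8 = s % 8 := PySem.Int.mod_eq_emod_of_pos (by norm_num)
      have hm4 : PySem.Int.mod s 4 = s % 4 := PySem.Int.mod_eq_emod_of_pos (by norm_num)
      have hm2 : PySem.Int.mod s 2 = s % 2 := PySem.Int.mod_eq_emod_of_pos (by norm_num)
      rw [pvALoop, dif_pos hlt, hm8, hm4, hm2]
      by_cases h80 : s % 8 = 0
      · rw [if_pos h80, ih (s - 8) (by omega) (by omega)]
        rw [pvChunks_full pt s h80 hlt]
        simp
      · rw [if_neg h80]
        by_cases h40 : s % 4 = 0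
        · rw [if_pos h40, ih (s - 4) (by omega) (by omega)]
          rw [pvChunks_four pt s (by omega)]
          simp
        · rw [if_neg h40]
          by_cases h20 : s % 2 = 0
          · rw [if_pos h20, ih (s - 2) (by omega) (by omega)]
            rw [pvChunks_two pt s (by omega)]
            simp
          · rw [if_neg h20, ih (s - 1) (by omega) (by omega)]
            rw [pvChunks_odd pt s (by omega)]
            simp

-- |s| ≤ 15 bounds the bit length by 4 (so A's 'name' index stays below 8)
lemma pvBitLength_le (s : Int) (h : s.natAbs ≤ 15) : PySem.Int.bitLength s ≤ 4 := by
  by_cases h0 : s = 0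
  · subst h0; simp [PySem.Int.bitLength_zero]
  · by_contra hgt
    have h1 := PySem.Int.two_pow_bitLength_le s h0
    have h2 : (2 : Nat) ^ 4 ≤ 2 ^ (PySem.Int.bitLength s - 1) :=
      Nat.pow_le_pow_right (by norm_num) (by omega)
    omega

-- ===== VERDICT (by name: the statement is the Claim_ definition above) =====
theorem getPackType_spec : Claim_equal_getPackType := by
  intro size unsigned count is_float hdom hpre
  unfold Spec_getPackType
  cases size with
  | none => cases unsigned <;> rfl
  | some s =>
    have hpre' : -16 < s := by simpa [Pre_getPackType] using hpre
    have hu : (if Option.getD unsigned true then (1 : Int) else 0)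
            = (if unsigned = some false then (0 : Int) else 1) := by
      cases unsigned with
      | none => rfl
      | some b => cases b <;> rfl
    simp only [getPackType, getPackType_alt]
    by_cases h8 : 8 < s
    · rw [pvALoop_eq_chunks _ s.toNat s (le_refl _) (by omega)]
      have hbl : (PySem.Int.bitLength (8 : Int) : Int) = 4 := by decide
      simp only [List.nil_append, hbl, hu]
      rw [if_pos (by split <;> omega)]
      have harr : (2 : Int) * (4 - 1) + (if unsigned = some false then (0 : Int) else 1)
                = 6 + (if unsigned = some false then (0 : Int) else 1) := by ring
      rw [harr]
      rw [if_pos h8]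
      simp only [pvChunks, List.append_assoc]
    · rw [pvALoop, dif_neg h8]
      have hbl : PySem.Int.bitLength s ≤ 4 := pvBitLength_le s (by omega)
      simp only [hu]
      rw [if_pos (by split <;> omega)]
      rw [if_neg h8]
      simp
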